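-- pv_equiv track=rewrite | github.com/9nightss/KOD8_ENC | kod8_engine.py | auto_detect
-- ===== SOURCE A (Python) =====
-- def _detect_image(t: str) -> bool:
--     """Detect Base64-encoded image by magic-byte prefix."""
--     return any(t.startswith(p) for p in (
--         "iVBORw0KGgo", "/9j/", "UklGR", "R0lGOD", "Qk0"))
--
-- def _detect_video(t: str) -> bool:
--     """Detect Base64-encoded video by magic-byte prefix."""
--     return any(t.startswith(p) for p in ("AAAB", "GkXf", "AAAA"))
--
-- def _detect_document(t: str) -> bool:
--     """PDF/DOCX Base64 prefix, or long prose."""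
--     if t.startswith("JVBERi0") or t.startswith("PK"):
--         return True
--     words = t.split()
--     return len(words) > 20 and sum(c.isalpha() for c in t) / max(len(t), 1) > 0.5
--
-- def _detect_numeric(t: str) -> bool:
--     """High ratio of digits/data-punctuation or JSON/CSV start token."""
--     ratio = sum(c.isdigit() or c in ".,+-eE[]{}:" for c in t) / max(len(t), 1)
--     return ratio > 0.45 or t.lstrip().startswith(("{", "["))
--
-- def _detect_text(t: str) -> bool:
--     """Plain printable text that isn't mostly digits."""
--     if not t:
--         return False
--     return (sum(c.isprintable() for c in t) / max(len(t), 1) > 0.85 and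
--             sum(c.isdigit()     for c in t) / max(len(t), 1) < 0.6)
--
-- def auto_detect(text: str) -> str:
--     """
--     AUTO-DETECT CIPHER LIST
--     ------------------------
--     Runs each detector in priority order; returns the first matching ID.
--     Priority: image > video > document > numeric > plain text > experimental.
--
--     The caller MUST store the returned cipher_id alongside the ciphertext —
--     it is required for decryption and cannot be recovered from the ciphertext.
--     """
--     for cid, check in [
--         ("CL2", _detect_image),
--         ("CL3", _detect_video),
--         ("CL4", _detect_document),
--         ("CL5", _detect_numeric),
--         ("CL1", _detect_text),
--     ]:
--         if check(text):
--             return cid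
--     return "CL6"
-- ===== SOURCE B (Python) =====
-- def auto_detect(text: str) -> str:
--     # Magic-prefix classification by a hashed table lookup on sliced heads
--     # (all ten magic prefixes are mutually non-prefixing, so at most one
--     # category can own the head), then ratio tallies computed from the
--     # DISTINCT characters of the text weighted by their multiplicities.
--     magic = {"iVBORw0KGgo": "CL2", "/9j/": "CL2", "UklGR": "CL2",
--              "R0lGOD": "CL2", "Qk0": "CL2",
--              "AAAB": "CL3", "GkXf": "CL3", "AAAA": "CL3",
--              "JVBERi0": "CL4", "PK": "CL4"}
--     for width in (11, 7, 6, 5, 4, 3, 2):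
--         hit = magic.get(text[:width])
--         if hit is not None:
--             return hit
--     m = max(len(text), 1)
--     digits = alpha = printable = data = 0
--     for c in set(text):
--         k = text.count(c)
--         if c.isdigit():
--             digits += k
--         if c.isalpha():
--             alpha += k
--         if c.isprintable():
--             printable += k
--         if c.isdigit() or c in ".,+-eE[]{}:":
--             data += k
--     if len(text.split()) > 20 and 2 * alpha > m:
--         return "CL4"
--     if 20 * data > 9 * m or text.lstrip()[:1] in ("{", "["):
--         return "CL5"
--     if text and 20 * printable > 17 * m and 5 * digits < 3 * m:
--         return "CL1"
--     return "CL6"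
-- ===== Notes on version B (the rewrite author's own statement) =====
-- stated objective: faster
-- what changed: Replaced the five per-detector startswith scans by one hashed magic-prefix table probed with sliced heads (the ten prefixes are mutually non-prefixing, so at most one category can own the head), and the per-character ratio rescans by tallies over the distinct characters weighted by their multiplicities via str.count.
import Mathlib
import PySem

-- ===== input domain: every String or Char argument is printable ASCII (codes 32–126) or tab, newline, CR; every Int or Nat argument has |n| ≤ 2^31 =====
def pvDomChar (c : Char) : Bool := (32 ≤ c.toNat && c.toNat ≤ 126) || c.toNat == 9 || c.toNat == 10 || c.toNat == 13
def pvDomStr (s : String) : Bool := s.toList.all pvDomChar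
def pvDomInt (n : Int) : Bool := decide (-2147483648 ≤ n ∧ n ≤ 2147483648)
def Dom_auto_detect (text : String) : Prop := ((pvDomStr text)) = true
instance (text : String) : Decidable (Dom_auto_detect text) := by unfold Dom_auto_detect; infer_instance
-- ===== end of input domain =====

-- B replaces A's five detector rescans by a hashed magic-prefix table probed on
-- sliced heads plus ratio tallies over the DISTINCT characters weighted by their
-- multiplicities (objective: faster, measured; float ratio
-- tests are ported as the equivalent exact integer comparisons — thresholds
-- 0.5, 0.45, 0.85, 0.6 are exact for float division at these magnitudes).

-- ===== PORT A =====

-- c.isprintable(): exact on the stated domain (ASCII 32–126 printable, tab/newline/CR not)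
def pvIsPrintable (c : Char) : Bool := 32 ≤ c.toNat && c.toNat ≤ 126

def pvDetectImage (t : String) : Bool :=
  ["iVBORw0KGgo", "/9j/", "UklGR", "R0lGOD", "Qk0"].any (fun p => PySem.Str.startswith t p)

def pvDetectVideo (t : String) : Bool :=
  ["AAAB", "GkXf", "AAAA"].any (fun p => PySem.Str.startswith t p)

def pvDetectDocument (t : String) : Bool :=
  if PySem.Str.startswith t "JVBERi0" || PySem.Str.startswith t "PK" then true
  else
    let words := PySem.Str.split₀ t
    -- sum(c.isalpha())/max(len,1) > 0.5  ⇔  2*sum > max(len,1)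
    decide (words.length > 20) &&
      decide (2 * (t.toList.foldl (fun a c => a + (if PySem.Chars.isalpha c then 1 else 0)) 0)
                > max t.toList.length 1)

def pvDetectNumeric (t : String) : Bool :=
  -- ratio > 0.45  ⇔  20*count > 9*max(len,1)
  let cnt := t.toList.foldl
    (fun a c => a + (if PySem.Chars.isdigit c || (".,+-eE[]{}:".toList.contains c) then 1 else 0)) 0
  decide (20 * cnt > 9 * max t.toList.length 1) ||
    (PySem.Str.startswith (PySem.Str.lstrip t) "{" || PySem.Str.startswith (PySem.Str.lstrip t) "[")

def pvDetectText (t : String) : Bool :=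
  if t = "" then false
  else
    -- > 0.85 ⇔ 20*cnt > 17*m ;  < 0.6 ⇔ 5*cnt < 3*m
    decide (20 * (t.toList.foldl (fun a c => a + (if pvIsPrintable c then 1 else 0)) 0)
              > 17 * max t.toList.length 1) &&
    decide (5 * (t.toList.foldl (fun a c => a + (if PySem.Chars.isdigit c then 1 else 0)) 0)
              < 3 * max t.toList.length 1)

-- the for-loop over the (cid, check) list with early return
def pvRun : List (String × (String → Bool)) → String → String
  | [], _ => "CL6"
  | (cid, check) :: rest, t => if check t then cid else pvRun rest t

def auto_detect (text : String) : String :=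
  pvRun [("CL2", pvDetectImage), ("CL3", pvDetectVideo), ("CL4", pvDetectDocument),
         ("CL5", pvDetectNumeric), ("CL1", pvDetectText)] text

-- ===== PORT B =====

-- the magic-prefix table (Python dict literal)
def pvMagic : PySem.Dict String String :=
  PySem.Dict.ofList
    [("iVBORw0KGgo", "CL2"), ("/9j/", "CL2"), ("UklGR", "CL2"), ("R0lGOD", "CL2"),
     ("Qk0", "CL2"), ("AAAB", "CL3"), ("GkXf", "CL3"), ("AAAA", "CL3"),
     ("JVBERi0", "CL4"), ("PK", "CL4")]

-- 'for width in (11,7,6,5,4,3,2): hit = magic.get(text[:width]); if hit is not None: return hit'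
def pvPrefixLoop (t : String) : List Int → Option String
  | [] => none
  | w :: ws =>
    match PySem.Dict.get? pvMagic (PySem.Str.slice t none (some w)) with
    | some hit => some hit
    | none => pvPrefixLoop t ws

-- 'for c in set(text): k = text.count(c); …' — text.count(c) for a 1-char c is the
-- character count (PySem.List.count on the code points, exact here); the fold's
-- value is a sum, so it does not depend on the set's iteration order.
def pvTallyB (l : List Char) : Nat × Nat × Nat × Nat :=
  (PySem.Set.ofList l).foldl
    (fun a c =>
      let k := PySem.List.count l c
      (a.1 + (if PySem.Chars.isdigit c then k else 0),
       a.2.1 + (if PySem.Chars.isalpha c then k else 0),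
       a.2.2.1 + (if pvIsPrintable c then k else 0),
       a.2.2.2 + (if PySem.Chars.isdigit c || (".,+-eE[]{}:".toList.contains c) then k else 0)))
    (0, 0, 0, 0)

def auto_detect_alt (text : String) : String :=
  match pvPrefixLoop text [11, 7, 6, 5, 4, 3, 2] with
  | some hit => hit
  | none =>
    let m := max text.toList.length 1
    let a := pvTallyB text.toList
    if decide ((PySem.Str.split₀ text).length > 20) && decide (2 * a.2.1 > m) then "CL4"
    else if decide (20 * a.2.2.2 > 9 * m) ||
        ((PySem.Str.slice (PySem.Str.lstrip text) none (some 1) == "{") ||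
         (PySem.Str.slice (PySem.Str.lstrip text) none (some 1) == "[")) then "CL5"
    else if (!decide (text = "")) && (decide (20 * a.2.2.1 > 17 * m) && decide (5 * a.1 < 3 * m)) then "CL1"
    else "CL6"

-- ===== PRECONDITION & SPEC =====
def Spec_auto_detect (text : String) (out : String) : Prop := out = auto_detect_alt text
instance (text : String) (out : String) : Decidable (Spec_auto_detect text out) := by unfold Spec_auto_detect; infer_instance

-- ===== CLAIM (what is proved, stated in full; the proofs are below) =====
def Claim_equal_auto_detect : Prop := ∀ (text : String), Dom_auto_detect text → Spec_auto_detect text (auto_detect text)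

-- ===== LEMMAS AND PROOFS =====

-- text[:w] is always a prefix of text
theorem pvSliceNonePrefix (l : List Char) (w : Int) : PySem.List.slice l none (some w) <+: l := by
  unfold PySem.List.slice
  exact List.take_prefix _ _

-- if text does not start with p, then no head slice of text equals p
theorem pvKeyFalse (t p : String) (w : Int) (h : PySem.Str.startswith t p = false) :
    (p == PySem.Str.slice t none (some w)) = false := by
  rw [beq_eq_false_iff_ne]
  intro e
  have hpre : p.toList <+: t.toList := by
    rw [e, PySem.Str.toList_slice, PySem.Chars.slice_eq_listSlice]
    exact pvSliceNonePrefix _ _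
  rw [PySem.Str.startswith_eq] at h
  rw [← PySem.Chars.startswith_iff] at hpre
  rw [h] at hpre
  exact Bool.false_ne_true hpre

-- if text starts with p and w = len(p), then text[:w] = p
theorem pvKeyTrue (t p : String) (w : Int) (h0 : 0 ≤ w) (hlen : p.toList.length = w.toNat)
    (h : PySem.Str.startswith t p = true) :
    (p == PySem.Str.slice t none (some w)) = true := by
  rw [beq_iff_eq]
  rw [PySem.Str.startswith_eq, PySem.Chars.startswith_iff] at h
  apply String.toList_inj.mp
  rw [PySem.Str.toList_slice, PySem.Chars.slice_eq_listSlice, PySem.List.slice_to _ h0,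
      ← hlen, Eq.symm (List.prefix_iff_eq_take.mp h)]

-- a head slice wider than p can only equal p when text = p itself
theorem pvKeyLong (t p : String) (w : Int) (h0 : 0 ≤ w) (hlen : p.toList.length < w.toNat)
    (hne : t ≠ p) : (p == PySem.Str.slice t none (some w)) = false := by
  rw [beq_eq_false_iff_ne]
  intro e
  have e' : p.toList = List.take w.toNat t.toList := by
    rw [e, PySem.Str.toList_slice, PySem.Chars.slice_eq_listSlice, PySem.List.slice_to _ h0]
  have hlt : t.toList.length < w.toNat := by
    by_contra hge
    have := congrArg List.length e'
    rw [List.length_take] at this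
    omega
  apply hne
  apply String.toList_inj.mp
  rw [List.take_of_length_le (by omega)] at e'
  exact e'.symm

-- a head slice narrower than p never equals p
theorem pvKeyShort (t p : String) (w : Int) (h0 : 0 ≤ w) (hlen : w.toNat < p.toList.length) :
    (p == PySem.Str.slice t none (some w)) = false := by
  rw [beq_eq_false_iff_ne]
  intro e
  have e' : p.toList = List.take w.toNat t.toList := by
    rw [e, PySem.Str.toList_slice, PySem.Chars.slice_eq_listSlice, PySem.List.slice_to _ h0]
  have := congrArg List.length e'
  rw [List.length_take] at this
  omega

-- B's one-character head test equals A's startswith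
theorem pvKeyEq (t p : String) (w : Int) (h0 : 0 ≤ w) (hlen : p.toList.length = w.toNat) :
    (PySem.Str.slice t none (some w) == p) = PySem.Str.startswith t p := by
  cases h : PySem.Str.startswith t p with
  | true =>
    have := pvKeyTrue t p w h0 hlen h
    rw [beq_iff_eq] at this
    rw [← this]
    exact beq_self_eq_true p
  | false =>
    have := pvKeyFalse t p w h
    rw [beq_eq_false_iff_ne] at this
    rw [beq_eq_false_iff_ne]
    exact fun e => this e.symm

-- two incomparable prefixes cannot both start the same string
theorem pvExcl (t p q : String) (h : PySem.Str.startswith t p = true)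
    (hpq : ¬ p.toList <+: q.toList ∧ ¬ q.toList <+: p.toList) :
    PySem.Str.startswith t q = false := by
  cases hq : PySem.Str.startswith t q with
  | false => rfl
  | true =>
    exfalso
    rw [PySem.Str.startswith_eq, PySem.Chars.startswith_iff] at h hq
    rcases List.prefix_or_prefix_of_prefix h hq with h' | h'
    · exact hpq.1 h'
    · exact hpq.2 h'

-- the dict literal, in constructor form
theorem pvMagic_eq : pvMagic = PySem.Dict.mk
    [("iVBORw0KGgo", "CL2"), ("/9j/", "CL2"), ("UklGR", "CL2"), ("R0lGOD", "CL2"),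
     ("Qk0", "CL2"), ("AAAB", "CL3"), ("GkXf", "CL3"), ("AAAA", "CL3"),
     ("JVBERi0", "CL4"), ("PK", "CL4")] := by decide

theorem pvGetNil (x : String) : (PySem.Dict.mk ([] : List (String × String))).get? x = none := by
  simp [PySem.Dict.get?]

-- counting folds of A are countP
theorem pvFoldCount (p : Char → Bool) (cs : List Char) (n : Nat) :
    cs.foldl (fun a c => a + (if p c then 1 else 0)) n = n + cs.countP p := by
  induction cs generalizing n with
  | nil => simp
  | cons c cs ih => simp only [List.foldl_cons, List.countP_cons, ih]; split_ifs <;> omega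

-- B's fused tally fold, componentwise as weighted sums over the set
theorem pvTallyBGo (l s : List Char) (a : Nat × Nat × Nat × Nat) :
    s.foldl
      (fun a c =>
        let k := PySem.List.count l c
        (a.1 + (if PySem.Chars.isdigit c then k else 0),
         a.2.1 + (if PySem.Chars.isalpha c then k else 0),
         a.2.2.1 + (if pvIsPrintable c then k else 0),
         a.2.2.2 + (if PySem.Chars.isdigit c || (".,+-eE[]{}:".toList.contains c) then k else 0)))
      a =
    (a.1 + ((s.map fun c => if PySem.Chars.isdigit c then PySem.List.count l c else 0).sum),
     a.2.1 + ((s.map fun c => if PySem.Chars.isalpha c then PySem.List.count l c else 0).sum),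
     a.2.2.1 + ((s.map fun c => if pvIsPrintable c then PySem.List.count l c else 0).sum),
     a.2.2.2 + ((s.map fun c => if PySem.Chars.isdigit c || (".,+-eE[]{}:".toList.contains c) then PySem.List.count l c else 0).sum)) := by
  induction s generalizing a with
  | nil => simp
  | cons c s ih =>
      rw [List.foldl_cons, ih]
      simp only [List.map_cons, List.sum_cons, Prod.mk.injEq]
      refine ⟨by omega, by omega, by omega, by omega⟩

-- an ite-weighted sum is a sum over the filtered list
theorem pvIteSum (p : Char → Bool) (f : Char → Nat) (s : List Char) :
    (s.map fun c => if p c then f c else 0).sum = ((s.filter p).map f).sum := by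
  induction s with
  | nil => rfl
  | cons c s ih =>
      by_cases h : p c <;> simp [h, ih]

-- multiplicity-weighted sum over the distinct characters is countP
theorem pvCountSum (p : Char → Bool) (l : List Char) :
    ((PySem.Set.ofList l).map fun c => if p c then PySem.List.count l c else 0).sum = l.countP p := by
  rw [pvIteSum]
  have hperm : (PySem.Set.ofList l).Perm l.dedup := by
    apply (List.perm_ext_iff_of_nodup (PySem.Set.nodup_ofList l) l.nodup_dedup).mpr
    intro a
    rw [PySem.Set.mem_ofList, List.mem_dedup]
  have := ((hperm.filter p).map fun c => PySem.List.count l c).sum_eq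
  rw [this]
  simp only [PySem.List.count_eq]
  exact List.sum_map_count_dedup_filter_eq_countP p l

-- B's tally is the four countP values
theorem pvTallyB_eq (l : List Char) :
    pvTallyB l =
      (l.countP (fun c => PySem.Chars.isdigit c),
       l.countP (fun c => PySem.Chars.isalpha c),
       l.countP (fun c => pvIsPrintable c),
       l.countP (fun c => PySem.Chars.isdigit c || (".,+-eE[]{}:".toList.contains c))) := by
  unfold pvTallyB
  rw [pvTallyBGo]
  simp only [pvCountSum, Nat.zero_add]

theorem auto_detect_eq (text : String) : auto_detect text = auto_detect_alt text := by
  by_cases h0 : PySem.Str.startswith text "iVBORw0KGgo"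
  · by_cases ht : text = "iVBORw0KGgo"
    · subst ht; decide
    · have f1 : PySem.Str.startswith text "JVBERi0" = false := pvExcl text "iVBORw0KGgo" "JVBERi0" h0 (by decide)
      have g1 : ∀ w : Int, ("JVBERi0" == PySem.Str.slice text none (some w)) = false := fun w => pvKeyFalse text "JVBERi0" w f1
      have f2 : PySem.Str.startswith text "R0lGOD" = false := pvExcl text "iVBORw0KGgo" "R0lGOD" h0 (by decide)
      have g2 : ∀ w : Int, ("R0lGOD" == PySem.Str.slice text none (some w)) = false := fun w => pvKeyFalse text "R0lGOD" w f2
      have f3 : PySem.Str.startswith text "UklGR" = false := pvExcl text "iVBORw0KGgo" "UklGR" h0 (by decide)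
      have g3 : ∀ w : Int, ("UklGR" == PySem.Str.slice text none (some w)) = false := fun w => pvKeyFalse text "UklGR" w f3
      have f4 : PySem.Str.startswith text "/9j/" = false := pvExcl text "iVBORw0KGgo" "/9j/" h0 (by decide)
      have g4 : ∀ w : Int, ("/9j/" == PySem.Str.slice text none (some w)) = false := fun w => pvKeyFalse text "/9j/" w f4
      have f5 : PySem.Str.startswith text "AAAB" = false := pvExcl text "iVBORw0KGgo" "AAAB" h0 (by decide)
      have g5 : ∀ w : Int, ("AAAB" == PySem.Str.slice text none (some w)) = false := fun w => pvKeyFalse text "AAAB" w f5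
      have f6 : PySem.Str.startswith text "GkXf" = false := pvExcl text "iVBORw0KGgo" "GkXf" h0 (by decide)
      have g6 : ∀ w : Int, ("GkXf" == PySem.Str.slice text none (some w)) = false := fun w => pvKeyFalse text "GkXf" w f6
      have f7 : PySem.Str.startswith text "AAAA" = false := pvExcl text "iVBORw0KGgo" "AAAA" h0 (by decide)
      have g7 : ∀ w : Int, ("AAAA" == PySem.Str.slice text none (some w)) = false := fun w => pvKeyFalse text "AAAA" w f7
      have f8 : PySem.Str.startswith text "Qk0" = false := pvExcl text "iVBORw0KGgo" "Qk0" h0 (by decide)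
      have g8 : ∀ w : Int, ("Qk0" == PySem.Str.slice text none (some w)) = false := fun w => pvKeyFalse text "Qk0" w f8
      have f9 : PySem.Str.startswith text "PK" = false := pvExcl text "iVBORw0KGgo" "PK" h0 (by decide)
      have g9 : ∀ w : Int, ("PK" == PySem.Str.slice text none (some w)) = false := fun w => pvKeyFalse text "PK" w f9
      have e0 : ("iVBORw0KGgo" == PySem.Str.slice text none (some 11)) = true := pvKeyTrue text "iVBORw0KGgo" 11 (by decide) (by decide) h0
      have e1 : ("iVBORw0KGgo" == PySem.Str.slice text none (some 7)) = false := pvKeyShort text "iVBORw0KGgo" 7 (by decide) (by decide)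
      have e2 : ("iVBORw0KGgo" == PySem.Str.slice text none (some 6)) = false := pvKeyShort text "iVBORw0KGgo" 6 (by decide) (by decide)
      have e3 : ("iVBORw0KGgo" == PySem.Str.slice text none (some 5)) = false := pvKeyShort text "iVBORw0KGgo" 5 (by decide) (by decide)
      have e4 : ("iVBORw0KGgo" == PySem.Str.slice text none (some 4)) = false := pvKeyShort text "iVBORw0KGgo" 4 (by decide) (by decide)
      have e5 : ("iVBORw0KGgo" == PySem.Str.slice text none (some 3)) = false := pvKeyShort text "iVBORw0KGgo" 3 (by decide) (by decide)
      have e6 : ("iVBORw0KGgo" == PySem.Str.slice text none (some 2)) = false := pvKeyShort text "iVBORw0KGgo" 2 (by decide) (by decide)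
      simp at h0 f1 f2 f3 f4 f5 f6 f7 f8 f9
      simp [auto_detect, auto_detect_alt, pvRun, pvDetectImage, pvPrefixLoop, pvMagic_eq, PySem.Dict.get?_mk_cons, List.any_cons, List.any_nil, h0, f2, f3, f4, f8, e0]
  by_cases h1 : PySem.Str.startswith text "JVBERi0"
  · by_cases ht : text = "JVBERi0"
    · subst ht; decide
    · have f0 : PySem.Str.startswith text "iVBORw0KGgo" = false := pvExcl text "JVBERi0" "iVBORw0KGgo" h1 (by decide)
      have g0 : ∀ w : Int, ("iVBORw0KGgo" == PySem.Str.slice text none (some w)) = false := fun w => pvKeyFalse text "iVBORw0KGgo" w f0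
      have f2 : PySem.Str.startswith text "R0lGOD" = false := pvExcl text "JVBERi0" "R0lGOD" h1 (by decide)
      have g2 : ∀ w : Int, ("R0lGOD" == PySem.Str.slice text none (some w)) = false := fun w => pvKeyFalse text "R0lGOD" w f2
      have f3 : PySem.Str.startswith text "UklGR" = false := pvExcl text "JVBERi0" "UklGR" h1 (by decide)
      have g3 : ∀ w : Int, ("UklGR" == PySem.Str.slice text none (some w)) = false := fun w => pvKeyFalse text "UklGR" w f3
      have f4 : PySem.Str.startswith text "/9j/" = false := pvExcl text "JVBERi0" "/9j/" h1 (by decide)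
      have g4 : ∀ w : Int, ("/9j/" == PySem.Str.slice text none (some w)) = false := fun w => pvKeyFalse text "/9j/" w f4
      have f5 : PySem.Str.startswith text "AAAB" = false := pvExcl text "JVBERi0" "AAAB" h1 (by decide)
      have g5 : ∀ w : Int, ("AAAB" == PySem.Str.slice text none (some w)) = false := fun w => pvKeyFalse text "AAAB" w f5
      have f6 : PySem.Str.startswith text "GkXf" = false := pvExcl text "JVBERi0" "GkXf" h1 (by decide)
      have g6 : ∀ w : Int, ("GkXf" == PySem.Str.slice text none (some w)) = false := fun w => pvKeyFalse text "GkXf" w f6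
      have f7 : PySem.Str.startswith text "AAAA" = false := pvExcl text "JVBERi0" "AAAA" h1 (by decide)
      have g7 : ∀ w : Int, ("AAAA" == PySem.Str.slice text none (some w)) = false := fun w => pvKeyFalse text "AAAA" w f7
      have f8 : PySem.Str.startswith text "Qk0" = false := pvExcl text "JVBERi0" "Qk0" h1 (by decide)
      have g8 : ∀ w : Int, ("Qk0" == PySem.Str.slice text none (some w)) = false := fun w => pvKeyFalse text "Qk0" w f8
      have f9 : PySem.Str.startswith text "PK" = false := pvExcl text "JVBERi0" "PK" h1 (by decide)
      have g9 : ∀ w : Int, ("PK" == PySem.Str.slice text none (some w)) = false := fun w => pvKeyFalse text "PK" w f9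
      have e0 : ("JVBERi0" == PySem.Str.slice text none (some 11)) = false := pvKeyLong text "JVBERi0" 11 (by decide) (by decide) ht
      have e1 : ("JVBERi0" == PySem.Str.slice text none (some 7)) = true := pvKeyTrue text "JVBERi0" 7 (by decide) (by decide) h1
      have e2 : ("JVBERi0" == PySem.Str.slice text none (some 6)) = false := pvKeyShort text "JVBERi0" 6 (by decide) (by decide)
      have e3 : ("JVBERi0" == PySem.Str.slice text none (some 5)) = false := pvKeyShort text "JVBERi0" 5 (by decide) (by decide)
      have e4 : ("JVBERi0" == PySem.Str.slice text none (some 4)) = false := pvKeyShort text "JVBERi0" 4 (by decide) (by decide)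
      have e5 : ("JVBERi0" == PySem.Str.slice text none (some 3)) = false := pvKeyShort text "JVBERi0" 3 (by decide) (by decide)
      have e6 : ("JVBERi0" == PySem.Str.slice text none (some 2)) = false := pvKeyShort text "JVBERi0" 2 (by decide) (by decide)
      simp at h1 f0 f2 f3 f4 f5 f6 f7 f8 f9
      simp [auto_detect, auto_detect_alt, pvRun, pvDetectImage, pvDetectVideo, pvDetectDocument, pvPrefixLoop, pvMagic_eq, PySem.Dict.get?_mk_cons, pvGetNil, List.any_cons, List.any_nil, h1, f0, g0, f2, g2, f3, g3, f4, g4, f5, g5, f6, g6, f7, g7, f8, g8, f9, g9, e0, e1]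
  by_cases h2 : PySem.Str.startswith text "R0lGOD"
  · by_cases ht : text = "R0lGOD"
    · subst ht; decide
    · have f0 : PySem.Str.startswith text "iVBORw0KGgo" = false := pvExcl text "R0lGOD" "iVBORw0KGgo" h2 (by decide)
      have g0 : ∀ w : Int, ("iVBORw0KGgo" == PySem.Str.slice text none (some w)) = false := fun w => pvKeyFalse text "iVBORw0KGgo" w f0
      have f1 : PySem.Str.startswith text "JVBERi0" = false := pvExcl text "R0lGOD" "JVBERi0" h2 (by decide)
      have g1 : ∀ w : Int, ("JVBERi0" == PySem.Str.slice text none (some w)) = false := fun w => pvKeyFalse text "JVBERi0" w f1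
      have f3 : PySem.Str.startswith text "UklGR" = false := pvExcl text "R0lGOD" "UklGR" h2 (by decide)
      have g3 : ∀ w : Int, ("UklGR" == PySem.Str.slice text none (some w)) = false := fun w => pvKeyFalse text "UklGR" w f3
      have f4 : PySem.Str.startswith text "/9j/" = false := pvExcl text "R0lGOD" "/9j/" h2 (by decide)
      have g4 : ∀ w : Int, ("/9j/" == PySem.Str.slice text none (some w)) = false := fun w => pvKeyFalse text "/9j/" w f4
      have f5 : PySem.Str.startswith text "AAAB" = false := pvExcl text "R0lGOD" "AAAB" h2 (by decide)
      have g5 : ∀ w : Int, ("AAAB" == PySem.Str.slice text none (some w)) = false := fun w => pvKeyFalse text "AAAB" w f5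
      have f6 : PySem.Str.startswith text "GkXf" = false := pvExcl text "R0lGOD" "GkXf" h2 (by decide)
      have g6 : ∀ w : Int, ("GkXf" == PySem.Str.slice text none (some w)) = false := fun w => pvKeyFalse text "GkXf" w f6
      have f7 : PySem.Str.startswith text "AAAA" = false := pvExcl text "R0lGOD" "AAAA" h2 (by decide)
      have g7 : ∀ w : Int, ("AAAA" == PySem.Str.slice text none (some w)) = false := fun w => pvKeyFalse text "AAAA" w f7
      have f8 : PySem.Str.startswith text "Qk0" = false := pvExcl text "R0lGOD" "Qk0" h2 (by decide)
      have g8 : ∀ w : Int, ("Qk0" == PySem.Str.slice text none (some w)) = false := fun w => pvKeyFalse text "Qk0" w f8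
      have f9 : PySem.Str.startswith text "PK" = false := pvExcl text "R0lGOD" "PK" h2 (by decide)
      have g9 : ∀ w : Int, ("PK" == PySem.Str.slice text none (some w)) = false := fun w => pvKeyFalse text "PK" w f9
      have e0 : ("R0lGOD" == PySem.Str.slice text none (some 11)) = false := pvKeyLong text "R0lGOD" 11 (by decide) (by decide) ht
      have e1 : ("R0lGOD" == PySem.Str.slice text none (some 7)) = false := pvKeyLong text "R0lGOD" 7 (by decide) (by decide) ht
      have e2 : ("R0lGOD" == PySem.Str.slice text none (some 6)) = true := pvKeyTrue text "R0lGOD" 6 (by decide) (by decide) h2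
      have e3 : ("R0lGOD" == PySem.Str.slice text none (some 5)) = false := pvKeyShort text "R0lGOD" 5 (by decide) (by decide)
      have e4 : ("R0lGOD" == PySem.Str.slice text none (some 4)) = false := pvKeyShort text "R0lGOD" 4 (by decide) (by decide)
      have e5 : ("R0lGOD" == PySem.Str.slice text none (some 3)) = false := pvKeyShort text "R0lGOD" 3 (by decide) (by decide)
      have e6 : ("R0lGOD" == PySem.Str.slice text none (some 2)) = false := pvKeyShort text "R0lGOD" 2 (by decide) (by decide)
      simp at h2 f0 f1 f3 f4 f5 f6 f7 f8 f9
      simp [auto_detect, auto_detect_alt, pvRun, pvDetectImage, pvPrefixLoop, pvMagic_eq, PySem.Dict.get?_mk_cons, pvGetNil, List.any_cons, List.any_nil, h2, f0, g0, g1, f3, g3, f4, g4, g5, g6, g7, f8, g8, g9, e0, e1, e2]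
  by_cases h3 : PySem.Str.startswith text "UklGR"
  · by_cases ht : text = "UklGR"
    · subst ht; decide
    · have f0 : PySem.Str.startswith text "iVBORw0KGgo" = false := pvExcl text "UklGR" "iVBORw0KGgo" h3 (by decide)
      have g0 : ∀ w : Int, ("iVBORw0KGgo" == PySem.Str.slice text none (some w)) = false := fun w => pvKeyFalse text "iVBORw0KGgo" w f0
      have f1 : PySem.Str.startswith text "JVBERi0" = false := pvExcl text "UklGR" "JVBERi0" h3 (by decide)
      have g1 : ∀ w : Int, ("JVBERi0" == PySem.Str.slice text none (some w)) = false := fun w => pvKeyFalse text "JVBERi0" w f1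
      have f2 : PySem.Str.startswith text "R0lGOD" = false := pvExcl text "UklGR" "R0lGOD" h3 (by decide)
      have g2 : ∀ w : Int, ("R0lGOD" == PySem.Str.slice text none (some w)) = false := fun w => pvKeyFalse text "R0lGOD" w f2
      have f4 : PySem.Str.startswith text "/9j/" = false := pvExcl text "UklGR" "/9j/" h3 (by decide)
      have g4 : ∀ w : Int, ("/9j/" == PySem.Str.slice text none (some w)) = false := fun w => pvKeyFalse text "/9j/" w f4
      have f5 : PySem.Str.startswith text "AAAB" = false := pvExcl text "UklGR" "AAAB" h3 (by decide)
      have g5 : ∀ w : Int, ("AAAB" == PySem.Str.slice text none (some w)) = false := fun w => pvKeyFalse text "AAAB" w f5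
      have f6 : PySem.Str.startswith text "GkXf" = false := pvExcl text "UklGR" "GkXf" h3 (by decide)
      have g6 : ∀ w : Int, ("GkXf" == PySem.Str.slice text none (some w)) = false := fun w => pvKeyFalse text "GkXf" w f6
      have f7 : PySem.Str.startswith text "AAAA" = false := pvExcl text "UklGR" "AAAA" h3 (by decide)
      have g7 : ∀ w : Int, ("AAAA" == PySem.Str.slice text none (some w)) = false := fun w => pvKeyFalse text "AAAA" w f7
      have f8 : PySem.Str.startswith text "Qk0" = false := pvExcl text "UklGR" "Qk0" h3 (by decide)
      have g8 : ∀ w : Int, ("Qk0" == PySem.Str.slice text none (some w)) = false := fun w => pvKeyFalse text "Qk0" w f8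
      have f9 : PySem.Str.startswith text "PK" = false := pvExcl text "UklGR" "PK" h3 (by decide)
      have g9 : ∀ w : Int, ("PK" == PySem.Str.slice text none (some w)) = false := fun w => pvKeyFalse text "PK" w f9
      have e0 : ("UklGR" == PySem.Str.slice text none (some 11)) = false := pvKeyLong text "UklGR" 11 (by decide) (by decide) ht
      have e1 : ("UklGR" == PySem.Str.slice text none (some 7)) = false := pvKeyLong text "UklGR" 7 (by decide) (by decide) ht
      have e2 : ("UklGR" == PySem.Str.slice text none (some 6)) = false := pvKeyLong text "UklGR" 6 (by decide) (by decide) ht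
      have e3 : ("UklGR" == PySem.Str.slice text none (some 5)) = true := pvKeyTrue text "UklGR" 5 (by decide) (by decide) h3
      have e4 : ("UklGR" == PySem.Str.slice text none (some 4)) = false := pvKeyShort text "UklGR" 4 (by decide) (by decide)
      have e5 : ("UklGR" == PySem.Str.slice text none (some 3)) = false := pvKeyShort text "UklGR" 3 (by decide) (by decide)
      have e6 : ("UklGR" == PySem.Str.slice text none (some 2)) = false := pvKeyShort text "UklGR" 2 (by decide) (by decide)
      simp at h3 f0 f1 f2 f4 f5 f6 f7 f8 f9
      simp [auto_detect, auto_detect_alt, pvRun, pvDetectImage, pvPrefixLoop, pvMagic_eq, PySem.Dict.get?_mk_cons, pvGetNil, List.any_cons, List.any_nil, h3, f0, g0, g1, f2, g2, f4, g4, g5, g6, g7, f8, g8, g9, e0, e1, e2, e3]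
  by_cases h4 : PySem.Str.startswith text "/9j/"
  · by_cases ht : text = "/9j/"
    · subst ht; decide
    · have f0 : PySem.Str.startswith text "iVBORw0KGgo" = false := pvExcl text "/9j/" "iVBORw0KGgo" h4 (by decide)
      have g0 : ∀ w : Int, ("iVBORw0KGgo" == PySem.Str.slice text none (some w)) = false := fun w => pvKeyFalse text "iVBORw0KGgo" w f0
      have f1 : PySem.Str.startswith text "JVBERi0" = false := pvExcl text "/9j/" "JVBERi0" h4 (by decide)
      have g1 : ∀ w : Int, ("JVBERi0" == PySem.Str.slice text none (some w)) = false := fun w => pvKeyFalse text "JVBERi0" w f1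
      have f2 : PySem.Str.startswith text "R0lGOD" = false := pvExcl text "/9j/" "R0lGOD" h4 (by decide)
      have g2 : ∀ w : Int, ("R0lGOD" == PySem.Str.slice text none (some w)) = false := fun w => pvKeyFalse text "R0lGOD" w f2
      have f3 : PySem.Str.startswith text "UklGR" = false := pvExcl text "/9j/" "UklGR" h4 (by decide)
      have g3 : ∀ w : Int, ("UklGR" == PySem.Str.slice text none (some w)) = false := fun w => pvKeyFalse text "UklGR" w f3
      have f5 : PySem.Str.startswith text "AAAB" = false := pvExcl text "/9j/" "AAAB" h4 (by decide)
      have g5 : ∀ w : Int, ("AAAB" == PySem.Str.slice text none (some w)) = false := fun w => pvKeyFalse text "AAAB" w f5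
      have f6 : PySem.Str.startswith text "GkXf" = false := pvExcl text "/9j/" "GkXf" h4 (by decide)
      have g6 : ∀ w : Int, ("GkXf" == PySem.Str.slice text none (some w)) = false := fun w => pvKeyFalse text "GkXf" w f6
      have f7 : PySem.Str.startswith text "AAAA" = false := pvExcl text "/9j/" "AAAA" h4 (by decide)
      have g7 : ∀ w : Int, ("AAAA" == PySem.Str.slice text none (some w)) = false := fun w => pvKeyFalse text "AAAA" w f7
      have f8 : PySem.Str.startswith text "Qk0" = false := pvExcl text "/9j/" "Qk0" h4 (by decide)
      have g8 : ∀ w : Int, ("Qk0" == PySem.Str.slice text none (some w)) = false := fun w => pvKeyFalse text "Qk0" w f8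
      have f9 : PySem.Str.startswith text "PK" = false := pvExcl text "/9j/" "PK" h4 (by decide)
      have g9 : ∀ w : Int, ("PK" == PySem.Str.slice text none (some w)) = false := fun w => pvKeyFalse text "PK" w f9
      have e0 : ("/9j/" == PySem.Str.slice text none (some 11)) = false := pvKeyLong text "/9j/" 11 (by decide) (by decide) ht
      have e1 : ("/9j/" == PySem.Str.slice text none (some 7)) = false := pvKeyLong text "/9j/" 7 (by decide) (by decide) ht
      have e2 : ("/9j/" == PySem.Str.slice text none (some 6)) = false := pvKeyLong text "/9j/" 6 (by decide) (by decide) ht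
      have e3 : ("/9j/" == PySem.Str.slice text none (some 5)) = false := pvKeyLong text "/9j/" 5 (by decide) (by decide) ht
      have e4 : ("/9j/" == PySem.Str.slice text none (some 4)) = true := pvKeyTrue text "/9j/" 4 (by decide) (by decide) h4
      have e5 : ("/9j/" == PySem.Str.slice text none (some 3)) = false := pvKeyShort text "/9j/" 3 (by decide) (by decide)
      have e6 : ("/9j/" == PySem.Str.slice text none (some 2)) = false := pvKeyShort text "/9j/" 2 (by decide) (by decide)
      simp at h4 f0 f1 f2 f3 f5 f6 f7 f8 f9
      simp [auto_detect, auto_detect_alt, pvRun, pvDetectImage, pvPrefixLoop, pvMagic_eq, PySem.Dict.get?_mk_cons, pvGetNil, List.any_cons, List.any_nil, h4, f0, g0, g1, f2, g2, f3, g3, g5, g6, g7, f8, g8, g9, e0, e1, e2, e3, e4]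
  by_cases h5 : PySem.Str.startswith text "AAAB"
  · by_cases ht : text = "AAAB"
    · subst ht; decide
    · have f0 : PySem.Str.startswith text "iVBORw0KGgo" = false := pvExcl text "AAAB" "iVBORw0KGgo" h5 (by decide)
      have g0 : ∀ w : Int, ("iVBORw0KGgo" == PySem.Str.slice text none (some w)) = false := fun w => pvKeyFalse text "iVBORw0KGgo" w f0
      have f1 : PySem.Str.startswith text "JVBERi0" = false := pvExcl text "AAAB" "JVBERi0" h5 (by decide)
      have g1 : ∀ w : Int, ("JVBERi0" == PySem.Str.slice text none (some w)) = false := fun w => pvKeyFalse text "JVBERi0" w f1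
      have f2 : PySem.Str.startswith text "R0lGOD" = false := pvExcl text "AAAB" "R0lGOD" h5 (by decide)
      have g2 : ∀ w : Int, ("R0lGOD" == PySem.Str.slice text none (some w)) = false := fun w => pvKeyFalse text "R0lGOD" w f2
      have f3 : PySem.Str.startswith text "UklGR" = false := pvExcl text "AAAB" "UklGR" h5 (by decide)
      have g3 : ∀ w : Int, ("UklGR" == PySem.Str.slice text none (some w)) = false := fun w => pvKeyFalse text "UklGR" w f3
      have f4 : PySem.Str.startswith text "/9j/" = false := pvExcl text "AAAB" "/9j/" h5 (by decide)
      have g4 : ∀ w : Int, ("/9j/" == PySem.Str.slice text none (some w)) = false := fun w => pvKeyFalse text "/9j/" w f4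
      have f6 : PySem.Str.startswith text "GkXf" = false := pvExcl text "AAAB" "GkXf" h5 (by decide)
      have g6 : ∀ w : Int, ("GkXf" == PySem.Str.slice text none (some w)) = false := fun w => pvKeyFalse text "GkXf" w f6
      have f7 : PySem.Str.startswith text "AAAA" = false := pvExcl text "AAAB" "AAAA" h5 (by decide)
      have g7 : ∀ w : Int, ("AAAA" == PySem.Str.slice text none (some w)) = false := fun w => pvKeyFalse text "AAAA" w f7
      have f8 : PySem.Str.startswith text "Qk0" = false := pvExcl text "AAAB" "Qk0" h5 (by decide)
      have g8 : ∀ w : Int, ("Qk0" == PySem.Str.slice text none (some w)) = false := fun w => pvKeyFalse text "Qk0" w f8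
      have f9 : PySem.Str.startswith text "PK" = false := pvExcl text "AAAB" "PK" h5 (by decide)
      have g9 : ∀ w : Int, ("PK" == PySem.Str.slice text none (some w)) = false := fun w => pvKeyFalse text "PK" w f9
      have e0 : ("AAAB" == PySem.Str.slice text none (some 11)) = false := pvKeyLong text "AAAB" 11 (by decide) (by decide) ht
      have e1 : ("AAAB" == PySem.Str.slice text none (some 7)) = false := pvKeyLong text "AAAB" 7 (by decide) (by decide) ht
      have e2 : ("AAAB" == PySem.Str.slice text none (some 6)) = false := pvKeyLong text "AAAB" 6 (by decide) (by decide) ht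
      have e3 : ("AAAB" == PySem.Str.slice text none (some 5)) = false := pvKeyLong text "AAAB" 5 (by decide) (by decide) ht
      have e4 : ("AAAB" == PySem.Str.slice text none (some 4)) = true := pvKeyTrue text "AAAB" 4 (by decide) (by decide) h5
      have e5 : ("AAAB" == PySem.Str.slice text none (some 3)) = false := pvKeyShort text "AAAB" 3 (by decide) (by decide)
      have e6 : ("AAAB" == PySem.Str.slice text none (some 2)) = false := pvKeyShort text "AAAB" 2 (by decide) (by decide)
      simp at h5 f0 f1 f2 f3 f4 f6 f7 f8 f9
      simp [auto_detect, auto_detect_alt, pvRun, pvDetectImage, pvDetectVideo, pvPrefixLoop, pvMagic_eq, PySem.Dict.get?_mk_cons, pvGetNil, List.any_cons, List.any_nil, h5, f0, g0, g1, f2, g2, f3, g3, f4, g4, f6, g6, f7, g7, f8, g8, g9, e0, e1, e2, e3, e4]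
  by_cases h6 : PySem.Str.startswith text "GkXf"
  · by_cases ht : text = "GkXf"
    · subst ht; decide
    · have f0 : PySem.Str.startswith text "iVBORw0KGgo" = false := pvExcl text "GkXf" "iVBORw0KGgo" h6 (by decide)
      have g0 : ∀ w : Int, ("iVBORw0KGgo" == PySem.Str.slice text none (some w)) = false := fun w => pvKeyFalse text "iVBORw0KGgo" w f0
      have f1 : PySem.Str.startswith text "JVBERi0" = false := pvExcl text "GkXf" "JVBERi0" h6 (by decide)
      have g1 : ∀ w : Int, ("JVBERi0" == PySem.Str.slice text none (some w)) = false := fun w => pvKeyFalse text "JVBERi0" w f1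
      have f2 : PySem.Str.startswith text "R0lGOD" = false := pvExcl text "GkXf" "R0lGOD" h6 (by decide)
      have g2 : ∀ w : Int, ("R0lGOD" == PySem.Str.slice text none (some w)) = false := fun w => pvKeyFalse text "R0lGOD" w f2
      have f3 : PySem.Str.startswith text "UklGR" = false := pvExcl text "GkXf" "UklGR" h6 (by decide)
      have g3 : ∀ w : Int, ("UklGR" == PySem.Str.slice text none (some w)) = false := fun w => pvKeyFalse text "UklGR" w f3
      have f4 : PySem.Str.startswith text "/9j/" = false := pvExcl text "GkXf" "/9j/" h6 (by decide)
      have g4 : ∀ w : Int, ("/9j/" == PySem.Str.slice text none (some w)) = false := fun w => pvKeyFalse text "/9j/" w f4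
      have f5 : PySem.Str.startswith text "AAAB" = false := pvExcl text "GkXf" "AAAB" h6 (by decide)
      have g5 : ∀ w : Int, ("AAAB" == PySem.Str.slice text none (some w)) = false := fun w => pvKeyFalse text "AAAB" w f5
      have f7 : PySem.Str.startswith text "AAAA" = false := pvExcl text "GkXf" "AAAA" h6 (by decide)
      have g7 : ∀ w : Int, ("AAAA" == PySem.Str.slice text none (some w)) = false := fun w => pvKeyFalse text "AAAA" w f7
      have f8 : PySem.Str.startswith text "Qk0" = false := pvExcl text "GkXf" "Qk0" h6 (by decide)
      have g8 : ∀ w : Int, ("Qk0" == PySem.Str.slice text none (some w)) = false := fun w => pvKeyFalse text "Qk0" w f8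
      have f9 : PySem.Str.startswith text "PK" = false := pvExcl text "GkXf" "PK" h6 (by decide)
      have g9 : ∀ w : Int, ("PK" == PySem.Str.slice text none (some w)) = false := fun w => pvKeyFalse text "PK" w f9
      have e0 : ("GkXf" == PySem.Str.slice text none (some 11)) = false := pvKeyLong text "GkXf" 11 (by decide) (by decide) ht
      have e1 : ("GkXf" == PySem.Str.slice text none (some 7)) = false := pvKeyLong text "GkXf" 7 (by decide) (by decide) ht
      have e2 : ("GkXf" == PySem.Str.slice text none (some 6)) = false := pvKeyLong text "GkXf" 6 (by decide) (by decide) ht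
      have e3 : ("GkXf" == PySem.Str.slice text none (some 5)) = false := pvKeyLong text "GkXf" 5 (by decide) (by decide) ht
      have e4 : ("GkXf" == PySem.Str.slice text none (some 4)) = true := pvKeyTrue text "GkXf" 4 (by decide) (by decide) h6
      have e5 : ("GkXf" == PySem.Str.slice text none (some 3)) = false := pvKeyShort text "GkXf" 3 (by decide) (by decide)
      have e6 : ("GkXf" == PySem.Str.slice text none (some 2)) = false := pvKeyShort text "GkXf" 2 (by decide) (by decide)
      simp at h6 f0 f1 f2 f3 f4 f5 f7 f8 f9
      simp [auto_detect, auto_detect_alt, pvRun, pvDetectImage, pvDetectVideo, pvPrefixLoop, pvMagic_eq, PySem.Dict.get?_mk_cons, pvGetNil, List.any_cons, List.any_nil, h6, f0, g0, g1, f2, g2, f3, g3, f4, g4, f5, g5, f7, g7, f8, g8, g9, e0, e1, e2, e3, e4]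
  by_cases h7 : PySem.Str.startswith text "AAAA"
  · by_cases ht : text = "AAAA"
    · subst ht; decide
    · have f0 : PySem.Str.startswith text "iVBORw0KGgo" = false := pvExcl text "AAAA" "iVBORw0KGgo" h7 (by decide)
      have g0 : ∀ w : Int, ("iVBORw0KGgo" == PySem.Str.slice text none (some w)) = false := fun w => pvKeyFalse text "iVBORw0KGgo" w f0
      have f1 : PySem.Str.startswith text "JVBERi0" = false := pvExcl text "AAAA" "JVBERi0" h7 (by decide)
      have g1 : ∀ w : Int, ("JVBERi0" == PySem.Str.slice text none (some w)) = false := fun w => pvKeyFalse text "JVBERi0" w f1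
      have f2 : PySem.Str.startswith text "R0lGOD" = false := pvExcl text "AAAA" "R0lGOD" h7 (by decide)
      have g2 : ∀ w : Int, ("R0lGOD" == PySem.Str.slice text none (some w)) = false := fun w => pvKeyFalse text "R0lGOD" w f2
      have f3 : PySem.Str.startswith text "UklGR" = false := pvExcl text "AAAA" "UklGR" h7 (by decide)
      have g3 : ∀ w : Int, ("UklGR" == PySem.Str.slice text none (some w)) = false := fun w => pvKeyFalse text "UklGR" w f3
      have f4 : PySem.Str.startswith text "/9j/" = false := pvExcl text "AAAA" "/9j/" h7 (by decide)
      have g4 : ∀ w : Int, ("/9j/" == PySem.Str.slice text none (some w)) = false := fun w => pvKeyFalse text "/9j/" w f4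
      have f5 : PySem.Str.startswith text "AAAB" = false := pvExcl text "AAAA" "AAAB" h7 (by decide)
      have g5 : ∀ w : Int, ("AAAB" == PySem.Str.slice text none (some w)) = false := fun w => pvKeyFalse text "AAAB" w f5
      have f6 : PySem.Str.startswith text "GkXf" = false := pvExcl text "AAAA" "GkXf" h7 (by decide)
      have g6 : ∀ w : Int, ("GkXf" == PySem.Str.slice text none (some w)) = false := fun w => pvKeyFalse text "GkXf" w f6
      have f8 : PySem.Str.startswith text "Qk0" = false := pvExcl text "AAAA" "Qk0" h7 (by decide)
      have g8 : ∀ w : Int, ("Qk0" == PySem.Str.slice text none (some w)) = false := fun w => pvKeyFalse text "Qk0" w f8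
      have f9 : PySem.Str.startswith text "PK" = false := pvExcl text "AAAA" "PK" h7 (by decide)
      have g9 : ∀ w : Int, ("PK" == PySem.Str.slice text none (some w)) = false := fun w => pvKeyFalse text "PK" w f9
      have e0 : ("AAAA" == PySem.Str.slice text none (some 11)) = false := pvKeyLong text "AAAA" 11 (by decide) (by decide) ht
      have e1 : ("AAAA" == PySem.Str.slice text none (some 7)) = false := pvKeyLong text "AAAA" 7 (by decide) (by decide) ht
      have e2 : ("AAAA" == PySem.Str.slice text none (some 6)) = false := pvKeyLong text "AAAA" 6 (by decide) (by decide) ht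
      have e3 : ("AAAA" == PySem.Str.slice text none (some 5)) = false := pvKeyLong text "AAAA" 5 (by decide) (by decide) ht
      have e4 : ("AAAA" == PySem.Str.slice text none (some 4)) = true := pvKeyTrue text "AAAA" 4 (by decide) (by decide) h7
      have e5 : ("AAAA" == PySem.Str.slice text none (some 3)) = false := pvKeyShort text "AAAA" 3 (by decide) (by decide)
      have e6 : ("AAAA" == PySem.Str.slice text none (some 2)) = false := pvKeyShort text "AAAA" 2 (by decide) (by decide)
      simp at h7 f0 f1 f2 f3 f4 f5 f6 f8 f9
      simp [auto_detect, auto_detect_alt, pvRun, pvDetectImage, pvDetectVideo, pvPrefixLoop, pvMagic_eq, PySem.Dict.get?_mk_cons, pvGetNil, List.any_cons, List.any_nil, h7, f0, g0, g1, f2, g2, f3, g3, f4, g4, f5, g5, f6, g6, f8, g8, g9, e0, e1, e2, e3, e4]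
  by_cases h8 : PySem.Str.startswith text "Qk0"
  · by_cases ht : text = "Qk0"
    · subst ht; decide
    · have f0 : PySem.Str.startswith text "iVBORw0KGgo" = false := pvExcl text "Qk0" "iVBORw0KGgo" h8 (by decide)
      have g0 : ∀ w : Int, ("iVBORw0KGgo" == PySem.Str.slice text none (some w)) = false := fun w => pvKeyFalse text "iVBORw0KGgo" w f0
      have f1 : PySem.Str.startswith text "JVBERi0" = false := pvExcl text "Qk0" "JVBERi0" h8 (by decide)
      have g1 : ∀ w : Int, ("JVBERi0" == PySem.Str.slice text none (some w)) = false := fun w => pvKeyFalse text "JVBERi0" w f1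
      have f2 : PySem.Str.startswith text "R0lGOD" = false := pvExcl text "Qk0" "R0lGOD" h8 (by decide)
      have g2 : ∀ w : Int, ("R0lGOD" == PySem.Str.slice text none (some w)) = false := fun w => pvKeyFalse text "R0lGOD" w f2
      have f3 : PySem.Str.startswith text "UklGR" = false := pvExcl text "Qk0" "UklGR" h8 (by decide)
      have g3 : ∀ w : Int, ("UklGR" == PySem.Str.slice text none (some w)) = false := fun w => pvKeyFalse text "UklGR" w f3
      have f4 : PySem.Str.startswith text "/9j/" = false := pvExcl text "Qk0" "/9j/" h8 (by decide)
      have g4 : ∀ w : Int, ("/9j/" == PySem.Str.slice text none (some w)) = false := fun w => pvKeyFalse text "/9j/" w f4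
      have f5 : PySem.Str.startswith text "AAAB" = false := pvExcl text "Qk0" "AAAB" h8 (by decide)
      have g5 : ∀ w : Int, ("AAAB" == PySem.Str.slice text none (some w)) = false := fun w => pvKeyFalse text "AAAB" w f5
      have f6 : PySem.Str.startswith text "GkXf" = false := pvExcl text "Qk0" "GkXf" h8 (by decide)
      have g6 : ∀ w : Int, ("GkXf" == PySem.Str.slice text none (some w)) = false := fun w => pvKeyFalse text "GkXf" w f6
      have f7 : PySem.Str.startswith text "AAAA" = false := pvExcl text "Qk0" "AAAA" h8 (by decide)
      have g7 : ∀ w : Int, ("AAAA" == PySem.Str.slice text none (some w)) = false := fun w => pvKeyFalse text "AAAA" w f7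
      have f9 : PySem.Str.startswith text "PK" = false := pvExcl text "Qk0" "PK" h8 (by decide)
      have g9 : ∀ w : Int, ("PK" == PySem.Str.slice text none (some w)) = false := fun w => pvKeyFalse text "PK" w f9
      have e0 : ("Qk0" == PySem.Str.slice text none (some 11)) = false := pvKeyLong text "Qk0" 11 (by decide) (by decide) ht
      have e1 : ("Qk0" == PySem.Str.slice text none (some 7)) = false := pvKeyLong text "Qk0" 7 (by decide) (by decide) ht
      have e2 : ("Qk0" == PySem.Str.slice text none (some 6)) = false := pvKeyLong text "Qk0" 6 (by decide) (by decide) ht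
      have e3 : ("Qk0" == PySem.Str.slice text none (some 5)) = false := pvKeyLong text "Qk0" 5 (by decide) (by decide) ht
      have e4 : ("Qk0" == PySem.Str.slice text none (some 4)) = false := pvKeyLong text "Qk0" 4 (by decide) (by decide) ht
      have e5 : ("Qk0" == PySem.Str.slice text none (some 3)) = true := pvKeyTrue text "Qk0" 3 (by decide) (by decide) h8
      have e6 : ("Qk0" == PySem.Str.slice text none (some 2)) = false := pvKeyShort text "Qk0" 2 (by decide) (by decide)
      simp at h8 f0 f1 f2 f3 f4 f5 f6 f7 f9
      simp [auto_detect, auto_detect_alt, pvRun, pvDetectImage, pvPrefixLoop, pvMagic_eq, PySem.Dict.get?_mk_cons, pvGetNil, List.any_cons, List.any_nil, h8, f0, g0, g1, f2, g2, f3, g3, f4, g4, g5, g6, g7, g9, e0, e1, e2, e3, e4, e5]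
  by_cases h9 : PySem.Str.startswith text "PK"
  · by_cases ht : text = "PK"
    · subst ht; decide
    · have f0 : PySem.Str.startswith text "iVBORw0KGgo" = false := pvExcl text "PK" "iVBORw0KGgo" h9 (by decide)
      have g0 : ∀ w : Int, ("iVBORw0KGgo" == PySem.Str.slice text none (some w)) = false := fun w => pvKeyFalse text "iVBORw0KGgo" w f0
      have f1 : PySem.Str.startswith text "JVBERi0" = false := pvExcl text "PK" "JVBERi0" h9 (by decide)
      have g1 : ∀ w : Int, ("JVBERi0" == PySem.Str.slice text none (some w)) = false := fun w => pvKeyFalse text "JVBERi0" w f1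
      have f2 : PySem.Str.startswith text "R0lGOD" = false := pvExcl text "PK" "R0lGOD" h9 (by decide)
      have g2 : ∀ w : Int, ("R0lGOD" == PySem.Str.slice text none (some w)) = false := fun w => pvKeyFalse text "R0lGOD" w f2
      have f3 : PySem.Str.startswith text "UklGR" = false := pvExcl text "PK" "UklGR" h9 (by decide)
      have g3 : ∀ w : Int, ("UklGR" == PySem.Str.slice text none (some w)) = false := fun w => pvKeyFalse text "UklGR" w f3
      have f4 : PySem.Str.startswith text "/9j/" = false := pvExcl text "PK" "/9j/" h9 (by decide)
      have g4 : ∀ w : Int, ("/9j/" == PySem.Str.slice text none (some w)) = false := fun w => pvKeyFalse text "/9j/" w f4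
      have f5 : PySem.Str.startswith text "AAAB" = false := pvExcl text "PK" "AAAB" h9 (by decide)
      have g5 : ∀ w : Int, ("AAAB" == PySem.Str.slice text none (some w)) = false := fun w => pvKeyFalse text "AAAB" w f5
      have f6 : PySem.Str.startswith text "GkXf" = false := pvExcl text "PK" "GkXf" h9 (by decide)
      have g6 : ∀ w : Int, ("GkXf" == PySem.Str.slice text none (some w)) = false := fun w => pvKeyFalse text "GkXf" w f6
      have f7 : PySem.Str.startswith text "AAAA" = false := pvExcl text "PK" "AAAA" h9 (by decide)
      have g7 : ∀ w : Int, ("AAAA" == PySem.Str.slice text none (some w)) = false := fun w => pvKeyFalse text "AAAA" w f7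
      have f8 : PySem.Str.startswith text "Qk0" = false := pvExcl text "PK" "Qk0" h9 (by decide)
      have g8 : ∀ w : Int, ("Qk0" == PySem.Str.slice text none (some w)) = false := fun w => pvKeyFalse text "Qk0" w f8
      have e0 : ("PK" == PySem.Str.slice text none (some 11)) = false := pvKeyLong text "PK" 11 (by decide) (by decide) ht
      have e1 : ("PK" == PySem.Str.slice text none (some 7)) = false := pvKeyLong text "PK" 7 (by decide) (by decide) ht
      have e2 : ("PK" == PySem.Str.slice text none (some 6)) = false := pvKeyLong text "PK" 6 (by decide) (by decide) ht
      have e3 : ("PK" == PySem.Str.slice text none (some 5)) = false := pvKeyLong text "PK" 5 (by decide) (by decide) ht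
      have e4 : ("PK" == PySem.Str.slice text none (some 4)) = false := pvKeyLong text "PK" 4 (by decide) (by decide) ht
      have e5 : ("PK" == PySem.Str.slice text none (some 3)) = false := pvKeyLong text "PK" 3 (by decide) (by decide) ht
      have e6 : ("PK" == PySem.Str.slice text none (some 2)) = true := pvKeyTrue text "PK" 2 (by decide) (by decide) h9
      simp at h9 f0 f1 f2 f3 f4 f5 f6 f7 f8
      simp [auto_detect, auto_detect_alt, pvRun, pvDetectImage, pvDetectVideo, pvDetectDocument, pvPrefixLoop, pvMagic_eq, PySem.Dict.get?_mk_cons, pvGetNil, List.any_cons, List.any_nil, h9, f0, g0, f1, g1, f2, g2, f3, g3, f4, g4, f5, g5, f6, g6, f7, g7, f8, g8, e0, e1, e2, e3, e4, e5, e6]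
  simp at h0 h1 h2 h3 h4 h5 h6 h7 h8 h9
  have g0 : ∀ w : Int, ("iVBORw0KGgo" == PySem.Str.slice text none (some w)) = false := fun w => pvKeyFalse text "iVBORw0KGgo" w (by simp [h0])
  have g1 : ∀ w : Int, ("JVBERi0" == PySem.Str.slice text none (some w)) = false := fun w => pvKeyFalse text "JVBERi0" w (by simp [h1])
  have g2 : ∀ w : Int, ("R0lGOD" == PySem.Str.slice text none (some w)) = false := fun w => pvKeyFalse text "R0lGOD" w (by simp [h2])
  have g3 : ∀ w : Int, ("UklGR" == PySem.Str.slice text none (some w)) = false := fun w => pvKeyFalse text "UklGR" w (by simp [h3])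
  have g4 : ∀ w : Int, ("/9j/" == PySem.Str.slice text none (some w)) = false := fun w => pvKeyFalse text "/9j/" w (by simp [h4])
  have g5 : ∀ w : Int, ("AAAB" == PySem.Str.slice text none (some w)) = false := fun w => pvKeyFalse text "AAAB" w (by simp [h5])
  have g6 : ∀ w : Int, ("GkXf" == PySem.Str.slice text none (some w)) = false := fun w => pvKeyFalse text "GkXf" w (by simp [h6])
  have g7 : ∀ w : Int, ("AAAA" == PySem.Str.slice text none (some w)) = false := fun w => pvKeyFalse text "AAAA" w (by simp [h7])
  have g8 : ∀ w : Int, ("Qk0" == PySem.Str.slice text none (some w)) = false := fun w => pvKeyFalse text "Qk0" w (by simp [h8])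
  have g9 : ∀ w : Int, ("PK" == PySem.Str.slice text none (some w)) = false := fun w => pvKeyFalse text "PK" w (by simp [h9])
  have hloop : pvPrefixLoop text [11, 7, 6, 5, 4, 3, 2] = none := by simp [pvPrefixLoop, pvMagic_eq, PySem.Dict.get?_mk_cons, pvGetNil, g0, g1, g2, g3, g4, g5, g6, g7, g8, g9]
  by_cases he : text = ""
  · subst he; decide
  · have b1 : (PySem.Str.slice (PySem.Str.lstrip text) none (some 1) == "{") = PySem.Str.startswith (PySem.Str.lstrip text) "{" := pvKeyEq (PySem.Str.lstrip text) "{" 1 (by decide) (by decide)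
    have b2 : (PySem.Str.slice (PySem.Str.lstrip text) none (some 1) == "[") = PySem.Str.startswith (PySem.Str.lstrip text) "[" := pvKeyEq (PySem.Str.lstrip text) "[" 1 (by decide) (by decide)
    simp only [auto_detect, auto_detect_alt, pvRun, pvDetectImage, pvDetectVideo, pvDetectDocument, pvDetectNumeric, pvDetectText, hloop, pvTallyB_eq]
    rw [pvFoldCount (fun c => PySem.Chars.isalpha c) text.toList 0,
        pvFoldCount (fun c => PySem.Chars.isdigit c || (".,+-eE[]{}:".toList.contains c)) text.toList 0,
        pvFoldCount (fun c => pvIsPrintable c) text.toList 0,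
        pvFoldCount (fun c => PySem.Chars.isdigit c) text.toList 0]
    simp [he, b1, b2, h0, h1, h2, h3, h4, h5, h6, h7, h8, h9]

-- ===== VERDICT (by name: the statement is the Claim_ definition above) =====
theorem auto_detect_spec : Claim_equal_auto_detect := by
  intro text _
  unfold Spec_auto_detect
  exact auto_detect_eq text
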